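-- pv_equiv track=rewrite | github.com/brkronheim/RDFAnalyzerCore | law/nano_tasks.py | _rechunk_urls
-- ===== SOURCE A (Python) =====
-- def _rechunk_urls(urls: list[str], max_files: int) -> dict[int, str]:
--     """Split a flat URL list into groups of at most *max_files* entries."""
--     groups: dict[int, str] = {}
--     for i, url in enumerate(urls):
--         g = i // max_files
--         if g in groups:
--             groups[g] += "," + url
--         else:
--             groups[g] = url
--     return groups
-- ===== SOURCE B (Python) =====
-- def _rechunk_urls(urls: list[str], max_files: int) -> dict[int, str]:
--     """Split a flat URL list into groups of at most *max_files* entries."""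
--     num_groups = (len(urls) + max_files - 1) // max_files
--     return {g: ",".join(urls[g * max_files:(g + 1) * max_files])
--             for g in range(num_groups)}
-- ===== Notes on version B (the rewrite author's own statement) =====
-- stated objective: simpler
-- what changed: Replaces the per-element loop with dict membership tests and string concatenation by computing the number of groups as ceil(len/max_files) and building each group's value in one shot by slicing and ','.join over the group indices.
-- outside the precondition, e.g. on _rechunk_urls(['a', 'b'], -1): A returns {0: 'a', -1: 'b'}, B returns {}; on _rechunk_urls([], 0): A returns {}, B raises ZeroDivisionError
import Mathlib
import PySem

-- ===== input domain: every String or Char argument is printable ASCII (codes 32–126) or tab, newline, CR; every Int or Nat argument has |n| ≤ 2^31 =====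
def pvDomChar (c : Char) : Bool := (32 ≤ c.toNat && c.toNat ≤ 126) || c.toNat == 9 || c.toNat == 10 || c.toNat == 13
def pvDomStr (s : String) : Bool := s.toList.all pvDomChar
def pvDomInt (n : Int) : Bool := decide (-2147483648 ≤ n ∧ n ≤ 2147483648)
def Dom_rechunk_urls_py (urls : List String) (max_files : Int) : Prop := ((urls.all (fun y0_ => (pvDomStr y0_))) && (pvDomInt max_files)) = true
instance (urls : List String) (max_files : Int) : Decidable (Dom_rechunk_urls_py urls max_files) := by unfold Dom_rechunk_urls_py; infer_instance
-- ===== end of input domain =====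

-- B replaces A's per-element loop (dict membership test + string concatenation per URL) by
-- computing the number of groups as ceil(len/max_files) and building each group in one shot
-- by slicing and joining; objective: simpler.

-- ===== PORT A =====
-- loop body of A's 'for i, url in enumerate(urls)' (kept as a named helper)
def rechunkStep (max_files : Int) (groups : PySem.Dict Int String) (p : Int × String) : PySem.Dict Int String :=
  let g := PySem.Int.floordiv p.1 max_files
  if groups.contains g then
    groups.insert g (groups.getD g "" ++ "," ++ p.2)
  else
    groups.insert g p.2

def rechunk_urls_py (urls : List String) (max_files : Int) : List (Int × String) :=
  ((PySem.List.enumerate urls 0).foldl (rechunkStep max_files) PySem.Dict.empty).items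

-- ===== PORT B =====
def rechunk_urls_py_alt (urls : List String) (max_files : Int) : List (Int × String) :=
  (PySem.List.pyRange 0 (PySem.Int.floordiv ((urls.length : Int) + max_files - 1) max_files) 1).map (fun g =>
    (g, PySem.Str.join "," (PySem.List.slice urls (some (g * max_files)) (some ((g + 1) * max_files)))))

-- ===== PRECONDITION & SPEC =====
-- Pre_ excludes max_files ≤ 0: at max_files = 0 both programs divide by zero (A returns {} only
-- on the degenerate empty list, where its loop never reaches the division), and a negative
-- chunk size is outside the function's natural domain — A's floor-division keys (0, -1, -1, …)
-- there are an accident of its implementation.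
def Pre_rechunk_urls_py (urls : List String) (max_files : Int) : Prop := 0 < max_files
instance (urls : List String) (max_files : Int) : Decidable (Pre_rechunk_urls_py urls max_files) := by unfold Pre_rechunk_urls_py; infer_instance

def pvWitness_rechunk_urls_py : List String × Int := (["a", "b", "c"], 2)

def Spec_rechunk_urls_py (urls : List String) (max_files : Int) (out : List (Int × String)) : Prop := out = rechunk_urls_py_alt urls max_files
instance (urls : List String) (max_files : Int) (out : List (Int × String)) : Decidable (Spec_rechunk_urls_py urls max_files out) := by unfold Spec_rechunk_urls_py; infer_instance

-- ===== CLAIM (what is proved, stated in full; the proofs are below) =====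
def Claim_equal_rechunk_urls_py : Prop := ∀ (urls : List String) (max_files : Int), Dom_rechunk_urls_py urls max_files → Pre_rechunk_urls_py urls max_files → Spec_rechunk_urls_py urls max_files (rechunk_urls_py urls max_files)

-- ===== LEMMAS AND PROOFS =====

-- the g-th chunk of xs, with chunk size m
def chunkRow (xs : List String) (m g : Nat) : Int × String :=
  ((g : Int), PySem.Str.join "," ((xs.drop (g * m)).take m))

-- the full chunked association list, ceil(|xs|/m) groups
def chunkItems (xs : List String) (m : Nat) : List (Int × String) :=
  (List.range ((xs.length + m - 1) / m)).map (chunkRow xs m)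

lemma str_join_singleton (sep x : String) : PySem.Str.join sep [x] = x := by
  apply String.toList_inj.mp
  simp [PySem.Str.toList_join, PySem.Chars.join_singleton]

lemma chars_join_append (sep x : List Char) (l : List (List Char)) (h : l ≠ []) :
    PySem.Chars.join sep (l ++ [x]) = PySem.Chars.join sep l ++ sep ++ x := by
  induction l with
  | nil => exact absurd rfl h
  | cons p rest ih =>
    cases rest with
    | nil => simp [PySem.Chars.join_cons_cons, PySem.Chars.join_singleton]
    | cons q rest' =>
      have ih' := ih (by simp)
      simp only [List.cons_append] at ih' ⊢
      rw [PySem.Chars.join_cons_cons, ih', PySem.Chars.join_cons_cons]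
      simp [List.append_assoc]

lemma str_join_append (sep x : String) (l : List String) (h : l ≠ []) :
    PySem.Str.join sep (l ++ [x]) = PySem.Str.join sep l ++ sep ++ x := by
  apply String.toList_inj.mp
  simp only [String.toList_append, PySem.Str.toList_join, List.map_append, List.map_cons,
    List.map_nil]
  exact chars_join_append sep.toList x.toList (l.map String.toList) (by simpa using h)

lemma chunkItems_nil (m : Nat) (hm : 0 < m) : chunkItems [] m = [] := by
  unfold chunkItems
  rw [show ([] : List String).length + m - 1 = m - 1 by simp, Nat.div_eq_of_lt (by omega)]
  simp

lemma keys_chunkItems (xs : List String) (m : Nat) :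
    (PySem.Dict.mk (chunkItems xs m)).keys
      = (List.range ((xs.length + m - 1) / m)).map (fun g : Nat => (g : Int)) := by
  rw [PySem.Dict.keys_mk]
  unfold chunkItems
  rw [List.map_map]
  rfl

lemma nodup_keys_chunkItems (xs : List String) (m : Nat) :
    (PySem.Dict.mk (chunkItems xs m)).keys.Nodup := by
  rw [keys_chunkItems]
  exact List.nodup_range.map (fun a b h => by exact_mod_cast h)

lemma contains_chunkItems (xs : List String) (m : Nat) (g : Nat) :
    (PySem.Dict.mk (chunkItems xs m)).contains ((g : Nat) : Int)
      = decide (g < (xs.length + m - 1) / m) := by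
  rw [PySem.Dict.contains_eq_decide_mem_keys, keys_chunkItems]
  simp [List.mem_range]

-- chunks strictly before the last are unaffected by appending one element
lemma chunkRow_append (xs : List String) (x : String) (m g : Nat)
    (h : g * m + m ≤ xs.length) : chunkRow (xs ++ [x]) m g = chunkRow xs m g := by
  unfold chunkRow
  rw [List.drop_append_of_le_length (by omega), List.take_append_of_le_length (by simp; omega)]

-- single step of A's loop, at index t = pre.length
lemma step_eq (m : Nat) (hm : 0 < m) (pre : List String) (x : String) :
    rechunkStep (m : Int) (PySem.Dict.mk (chunkItems pre m)) ((pre.length : Int), x)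
      = PySem.Dict.mk (chunkItems (pre ++ [x]) m) := by
  have hdm := Nat.div_add_mod pre.length m
  set t := pre.length with ht
  set g := t / m with hg
  set r := t % m with hr
  have hrm : r < m := Nat.mod_lt _ hm
  have hq' : (t + 1 + m - 1) / m = g + 1 := by
    have h2 : t + 1 + m - 1 = m * g + (r + m) := by omega
    rw [h2, Nat.mul_add_div hm, Nat.add_div_right _ hm, Nat.div_eq_of_lt hrm]
  have hmgc : m * g = g * m := Nat.mul_comm m g
  have hfd : PySem.Int.floordiv (t : Int) (m : Int) = ((g : Nat) : Int) :=
    PySem.Int.floordiv_natCast t m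
  have hlen1 : chunkItems (pre ++ [x]) m = (List.range (g + 1)).map (chunkRow (pre ++ [x]) m) := by
    unfold chunkItems
    rw [List.length_append, List.length_cons, List.length_nil, hq']
  by_cases hr0 : r = 0
  · -- index t starts a fresh group g
    have hq0 : (t + m - 1) / m = g := by
      have h2 : t + m - 1 = m * g + (m - 1) := by omega
      rw [h2, Nat.mul_add_div hm, Nat.div_eq_of_lt (by omega), Nat.add_zero]
    have hcont : (PySem.Dict.mk (chunkItems pre m)).contains ((g : Nat) : Int) = false := by
      rw [contains_chunkItems, hq0]; simp
    have hgmt : g * m = t := by omega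
    simp only [rechunkStep, hfd, hcont, Bool.false_eq_true, if_false]
    apply PySem.Dict.ext
    rw [PySem.Dict.items_insert_of_not_contains _ _ hcont]
    show chunkItems pre m ++ [(((g : Nat) : Int), x)] = chunkItems (pre ++ [x]) m
    rw [hlen1, List.range_succ, List.map_append]
    unfold chunkItems
    rw [hq0]
    congr 1
    · apply List.map_congr_left
      intro g' hg'
      have hg'lt : g' < g := List.mem_range.mp hg'
      have h4 : (g' + 1) * m = g' * m + m := by ring
      have h5 : (g' + 1) * m ≤ g * m := Nat.mul_le_mul_right _ (by omega)
      exact (chunkRow_append pre x m g' (by omega)).symm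
    · simp only [List.map_cons, List.map_nil]
      unfold chunkRow
      rw [show g * m = t from by omega, ht, List.drop_append_of_le_length (le_refl _),
        List.drop_length, List.nil_append,
        List.take_of_length_le (by simpa using hm), str_join_singleton]
  · -- index t extends the existing last group g
    have hq1 : (t + m - 1) / m = g + 1 := by
      have h2 : t + m - 1 = m * g + (r - 1 + m) := by omega
      rw [h2, Nat.mul_add_div hm, Nat.add_div_right _ hm, Nat.div_eq_of_lt (by omega)]
    have hcont : (PySem.Dict.mk (chunkItems pre m)).contains ((g : Nat) : Int) = true := by
      rw [contains_chunkItems, hq1]; simp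
    have hgmt : g * m ≤ t := by omega
    have hdrop : (pre ++ [x]).drop (g * m) = pre.drop (g * m) ++ [x] :=
      List.drop_append_of_le_length hgmt
    have hdlen : (pre.drop (g * m)).length = r := by
      rw [List.length_drop]; omega
    have hmem : (((g : Nat) : Int), PySem.Str.join "," ((pre.drop (g * m)).take m)) ∈ chunkItems pre m := by
      unfold chunkItems
      rw [hq1]
      exact List.mem_map.mpr ⟨g, List.mem_range.mpr (by omega), rfl⟩
    have hgetD : (PySem.Dict.mk (chunkItems pre m)).getD ((g : Nat) : Int) ""
        = PySem.Str.join "," ((pre.drop (g * m)).take m) :=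
      PySem.Dict.getD_of_mem_items _ hmem (nodup_keys_chunkItems pre m) ""
    simp only [rechunkStep, hfd, hcont, if_true]
    apply PySem.Dict.ext
    rw [PySem.Dict.items_insert_of_contains _ _ hcont, hgetD]
    show (chunkItems pre m).map _ = chunkItems (pre ++ [x]) m
    rw [hlen1]
    unfold chunkItems
    rw [hq1, List.map_map]
    apply List.map_congr_left
    intro g' hg'
    have hg'le : g' < g + 1 := List.mem_range.mp hg'
    by_cases hgg : g' = g
    · subst hgg
      have hnn : pre.drop (g * m) ≠ [] := by
        intro hnil
        rw [hnil] at hdlen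
        simp at hdlen
        omega
      simp only [Function.comp, chunkRow, beq_self_eq_true, if_true]
      rw [List.take_of_length_le (by rw [hdlen]; omega), hdrop,
        List.take_of_length_le
          (by rw [List.length_append, hdlen, List.length_cons, List.length_nil]; omega),
        str_join_append "," x _ hnn]
    · have hne : ((((g' : Nat) : Int)) == (((g : Nat) : Int))) = false := by
        simp only [beq_eq_false_iff_ne, ne_eq, Nat.cast_inj]
        omega
      simp only [Function.comp, chunkRow, hne, Bool.false_eq_true, if_false]
      have h4 : (g' + 1) * m = g' * m + m := by ring
      have h5 : (g' + 1) * m ≤ g * m := Nat.mul_le_mul_right _ (by omega)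
      have := chunkRow_append pre x m g' (by omega)
      unfold chunkRow at this
      exact this.symm

lemma fold_inv (m : Nat) (hm : 0 < m) (rest : List String) : ∀ (pre : List String),
    (PySem.List.enumerate rest (pre.length : Int)).foldl (rechunkStep (m : Int))
        (PySem.Dict.mk (chunkItems pre m))
      = PySem.Dict.mk (chunkItems (pre ++ rest) m) := by
  induction rest with
  | nil => intro pre; simp [PySem.List.enumerate_nil]
  | cons x rest' ih =>
    intro pre
    rw [PySem.List.enumerate_cons, List.foldl_cons, step_eq m hm pre x]
    have := ih (pre ++ [x])
    simp only [List.length_append, List.length_cons, List.length_nil, Nat.cast_add,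
      Nat.cast_one, List.append_assoc, List.singleton_append, zero_add] at this
    exact this

lemma alt_eq (urls : List String) (m : Nat) (hm : 0 < m) :
    rechunk_urls_py_alt urls (m : Int) = chunkItems urls m := by
  unfold rechunk_urls_py_alt chunkItems
  have h1 : (urls.length : Int) + (m : Int) - 1 = ((urls.length + m - 1 : Nat) : Int) := by
    push_cast [Nat.cast_sub (by omega : 1 ≤ urls.length + m)]; ring
  rw [h1, PySem.Int.floordiv_natCast, PySem.List.pyRange_zero_nat, List.map_map]
  apply List.map_congr_left
  intro g _
  simp only [Function.comp]
  unfold chunkRow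
  have h2 : ((g : Int) * (m : Int)) = ((g * m : Nat) : Int) := by push_cast; ring
  have h3 : ((g : Int) + 1) * (m : Int) = ((g * m : Nat) : Int) + ((m : Nat) : Int) := by
    push_cast; ring
  rw [h2, h3, PySem.List.slice_natCast_add]

-- ===== VERDICT (by name: the statement is the Claim_ definition above) =====
theorem rechunk_urls_py_spec : Claim_equal_rechunk_urls_py := by
  intro urls max_files _ hpre
  unfold Spec_rechunk_urls_py
  have hpre' : 0 < max_files := hpre
  have hmf : max_files = ((max_files.toNat : Nat) : Int) := (Int.toNat_of_nonneg hpre'.le).symm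
  have hm : 0 < max_files.toNat := by omega
  rw [hmf, alt_eq urls _ hm]
  unfold rechunk_urls_py
  have h0 : PySem.Dict.empty = PySem.Dict.mk (chunkItems ([] : List String) max_files.toNat) := by
    rw [chunkItems_nil _ hm]; rfl
  rw [h0, show (0 : Int) = ((([] : List String).length : Nat) : Int) by simp,
    fold_inv max_files.toNat hm urls []]
  simp
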